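-- pv_equiv track=rewrite | github.com/dyshleva/pb-homework | week3/gray_code.py | undo_zeros
-- ===== SOURCE A (Python) =====
-- def undo_zeros(s: str) -> (str, str):
--     '''
--     Remove zeros at the beginning of binary representation
--
--     Args:
--         s: string to be modified
--     '''
--     new_out = ""
--     lst = ""
--     found_one = False
--     for ch in s:
--         if not found_one and ch=='0':
--             lst += ch
--         elif ch=='1':
--             found_one = True
--             new_out += ch
--         else:
--             new_out += ch
--     return (lst, new_out)
-- ===== SOURCE B (Python) =====
-- def undo_zeros(s: str) -> (str, str):
--     """Collect the zeros occurring before the first '1' into one string;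
--     every other character, in its original order, goes into the second."""
--     i = s.find('1')
--     head, tail = (s, "") if i == -1 else (s[:i], s[i:])
--     return ('0' * head.count('0'), head.replace('0', '') + tail)
-- ===== Notes on version B (the rewrite author's own statement) =====
-- stated objective: simpler
-- what changed: Replaces A's character-by-character loop carrying a found_one flag by a find('1') split into head and tail, building the zero string with head.count('0') and the remainder with head.replace('0',''); no state machine remains.
import Mathlib
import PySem

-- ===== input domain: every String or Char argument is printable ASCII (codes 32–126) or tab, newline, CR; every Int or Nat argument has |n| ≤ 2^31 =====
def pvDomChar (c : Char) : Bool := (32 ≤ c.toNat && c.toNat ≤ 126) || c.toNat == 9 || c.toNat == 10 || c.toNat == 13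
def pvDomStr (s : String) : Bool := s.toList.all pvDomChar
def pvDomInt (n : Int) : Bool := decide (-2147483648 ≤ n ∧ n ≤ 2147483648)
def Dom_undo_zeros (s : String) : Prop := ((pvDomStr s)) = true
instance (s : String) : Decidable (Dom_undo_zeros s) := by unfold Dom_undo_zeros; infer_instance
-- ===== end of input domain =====

-- B: find('1')-split plus count/replace instead of A's stateful loop (objective: simpler).
-- ===== PORT A =====
def pvAStep (st : List Char × List Char × Bool) (ch : Char) : List Char × List Char × Bool :=
  if !st.2.2 && ch == '0' then (st.1, st.2.1 ++ [ch], st.2.2)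
  else if ch == '1' then (st.1 ++ [ch], st.2.1, true)
  else (st.1 ++ [ch], st.2.1, st.2.2)

def undo_zeros (s : String) : String × String :=
  let r := s.toList.foldl pvAStep ([], [], false)
  (String.ofList r.2.1, String.ofList r.1)

-- ===== PORT B =====
def undo_zeros_alt (s : String) : String × String :=
  let i := PySem.Str.find s "1"
  let cs := s.toList
  let pr : List Char × List Char :=
    if i = -1 then (cs, []) else (PySem.List.slice cs none (some i), PySem.List.slice cs (some i) none)
  (String.ofList (List.replicate (PySem.Chars.count pr.1 ['0']) '0'),
   String.ofList (PySem.Chars.replace pr.1 ['0'] [] ++ pr.2))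

-- ===== PRECONDITION & SPEC =====
def Spec_undo_zeros (s : String) (out : String × String) : Prop := out = undo_zeros_alt s
instance (s : String) (out : String × String) : Decidable (Spec_undo_zeros s out) := by unfold Spec_undo_zeros; infer_instance

-- ===== CLAIM =====
def Claim_equal_undo_zeros : Prop := ∀ (s : String), Dom_undo_zeros s → Spec_undo_zeros s (undo_zeros s)

-- ===== LEMMAS AND PROOFS =====
-- Chars.count with a single-character needle is List.count
lemma pv_count_go_single (c : Char) (l : List Char) :
    ∀ fuel acc, l.length ≤ fuel → PySem.Chars.count.go [c] fuel l acc = acc + l.count c := by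
  induction l with
  | nil => intro fuel acc _; cases fuel <;> simp [PySem.Chars.count.go]
  | cons x t ih =>
    intro fuel acc hf
    cases fuel with
    | zero => simp at hf
    | succ f =>
      have hp : List.isPrefixOf [c] (x :: t) = (c == x) := by simp [List.isPrefixOf]
      simp only [PySem.Chars.count.go, hp]
      by_cases hx : x = c
      · subst hx
        simp only [beq_self_eq_true, if_true, List.length_cons, List.length_nil,
          List.drop_succ_cons, List.drop_zero]
        rw [ih f (acc + 1) (by simpa using hf)]
        simp
        omega
      · have hxb : (c == x) = false := beq_false_of_ne (fun e => hx e.symm)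
        simp only [hxb, Bool.false_eq_true, if_false]
        rw [ih f acc (by simpa using hf)]
        simp [hx]

lemma pv_count_single (c : Char) (l : List Char) :
    PySem.Chars.count l [c] = l.count c := by
  unfold PySem.Chars.count
  simp only [List.isEmpty_cons]
  simpa using pv_count_go_single c l l.length 0 le_rfl

-- Chars.replace deleting a single character is a filter
lemma pv_replace_go_single (c : Char) (l : List Char) :
    ∀ fuel acc, l.length ≤ fuel →
      PySem.Chars.replace.go [c] [] fuel l acc = acc.reverse ++ l.filter (fun x => x != c) := by
  induction l with
  | nil => intro fuel acc _; cases fuel <;> simp [PySem.Chars.replace.go]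
  | cons x t ih =>
    intro fuel acc hf
    cases fuel with
    | zero => simp at hf
    | succ f =>
      have hp : List.isPrefixOf [c] (x :: t) = (c == x) := by simp [List.isPrefixOf]
      simp only [PySem.Chars.replace.go, hp]
      by_cases hx : x = c
      · subst hx
        simp only [beq_self_eq_true, if_true, List.length_cons, List.length_nil,
          List.drop_succ_cons, List.drop_zero, List.reverse_nil, List.nil_append]
        rw [ih f acc (by simpa using hf)]
        simp
      · have hxb : (c == x) = false := beq_false_of_ne (fun e => hx e.symm)
        simp only [hxb, Bool.false_eq_true, if_false]
        rw [ih f (x :: acc) (by simpa using hf)]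
        simp [hx, bne]

lemma pv_replace_single (c : Char) (l : List Char) :
    PySem.Chars.replace l [c] [] = l.filter (fun x => x != c) := by
  unfold PySem.Chars.replace
  simp only [List.isEmpty_cons]
  simpa using pv_replace_go_single c l l.length [] le_rfl

-- found_one = True: the rest of the loop appends every char to new_out
lemma pvA_found (cs : List Char) (o l : List Char) :
    cs.foldl pvAStep (o, l, true) = (o ++ cs, l, true) := by
  induction cs generalizing o with
  | nil => simp
  | cons c cs ih =>
    simp only [List.foldl_cons, pvAStep]
    by_cases h1 : c == '1' <;> simp [h1, ih]

-- no '1' yet and none in cs: zeros go to lst, the rest to new_out, found_one stays False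
lemma pvA_nofind (cs : List Char) (h : '1' ∉ cs) (o l : List Char) :
    cs.foldl pvAStep (o, l, false) =
      (o ++ cs.filter (fun c => c != '0'), l ++ cs.filter (fun c => c == '0'), false) := by
  induction cs generalizing o l with
  | nil => simp
  | cons c cs ih =>
    have hc1 : (c == '1') = false := by
      simp only [List.mem_cons, not_or] at h
      exact beq_false_of_ne (fun e => h.1 e.symm)
    have h' : '1' ∉ cs := fun hm => h (List.mem_cons_of_mem _ hm)
    simp only [List.foldl_cons, pvAStep, hc1]
    by_cases h0 : c == '0' <;> simp [h0, ih h', bne]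

-- the zeros of a list, kept by A as a filter, are B's replicate-of-count
lemma pv_filter_zero_eq (l : List Char) :
    l.filter (fun c => c == '0') = List.replicate (l.count '0') '0' :=
  List.filter_beq '0'

-- ===== VERDICT =====
theorem undo_zeros_spec : Claim_equal_undo_zeros := by
  intro s _
  unfold Spec_undo_zeros undo_zeros undo_zeros_alt
  simp only [PySem.Str.find_eq]
  set cs := s.toList with hcs
  have h1l : ("1" : String).toList = ['1'] := rfl
  rw [h1l]
  by_cases hneg : PySem.Chars.find cs ['1'] = -1
  · have hnm : '1' ∉ cs := by
      have := (PySem.Chars.find_eq_neg_one_iff cs ['1']).mp hneg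
      intro hm
      obtain ⟨u, v, huv⟩ := List.append_of_mem hm
      exact this ⟨u, v, by simp [huv]⟩
    rw [pvA_nofind cs hnm [] []]
    simp [hneg, pv_count_single, pv_replace_single, pv_filter_zero_eq]
  · have hpos : 0 ≤ PySem.Chars.find cs ['1'] := by
      have := PySem.Chars.neg_one_le_find cs ['1']
      omega
    obtain ⟨hpre, hmin⟩ := PySem.Chars.find_spec (s := cs) (sub := ['1']) hpos
    set i := (PySem.Chars.find cs ['1']).toNat with hi
    have hsplit : cs = cs.take i ++ cs.drop i := (List.take_append_drop i cs).symm
    have hno1 : '1' ∉ cs.take i := by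
      intro hm
      obtain ⟨j, hj, hjv⟩ := List.getElem_of_mem hm
      have hjlt : j < i := lt_of_lt_of_le hj (by simp)
      apply hmin j hjlt
      have hjcs : j < cs.length := lt_of_lt_of_le hjlt (by
        have := PySem.Chars.find_le_length cs ['1']
        omega)
      refine ⟨cs.drop (j+1), ?_⟩
      have : cs.drop j = cs[j] :: cs.drop (j+1) := List.drop_eq_getElem_cons hjcs
      rw [this]
      have : cs[j] = '1' := by
        have := List.getElem_take (xs := cs) (i := j) (h := by simpa using hj)
        rw [← this]; exact hjv
      simp [this]
    have hdrop : cs.drop i = '1' :: cs.drop (i+1) := by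
      obtain ⟨t, ht⟩ := hpre
      have hlen : i < cs.length := by
        by_contra hge
        rw [List.drop_eq_nil_of_le (Nat.le_of_not_lt hge)] at ht
        simp at ht
      have h2 : '1' :: t = cs[i] :: cs.drop (i+1) := by
        rw [List.drop_eq_getElem_cons hlen] at ht
        simpa using ht
      rw [List.drop_eq_getElem_cons hlen]
      injection h2 with h1 _
      rw [← h1]
    -- evaluate A by splitting the fold at i
    conv_lhs => rw [hsplit]
    rw [List.foldl_append, pvA_nofind _ hno1 [] [], hdrop]
    rw [List.foldl_cons]
    have hstep : pvAStep (List.filter (fun c => c != '0') (cs.take i),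
        List.filter (fun c => c == '0') (cs.take i), false) '1'
        = (List.filter (fun c => c != '0') (cs.take i) ++ ['1'],
           List.filter (fun c => c == '0') (cs.take i), true) := by
      simp [pvAStep]
    simp only [List.nil_append]
    rw [hstep, pvA_found]
    -- evaluate B
    have hislice : PySem.List.slice cs none (some (PySem.Chars.find cs ['1'])) = cs.take i := by
      rw [PySem.List.slice_to _ hpos]
    have hislice2 : PySem.List.slice cs (some (PySem.Chars.find cs ['1'])) none = cs.drop i := by
      rw [PySem.List.slice_from _ hpos]
    simp [hneg, hislice, hislice2, hdrop, bne, pv_count_single, pv_replace_single,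
      pv_filter_zero_eq]
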